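-- pv_equiv track=rewrite | github.com/Wellan76/code-de-vigen-re | Projet_info_n1.py | IC11
-- ===== SOURCE A (Python) =====
-- def IC11(a:int):
--     str = ""
--     sous_chaine = []
--     for j in range(0,11):
--         for i in range(j,len(a),11):
--             str = str + a[i]
--         sous_chaine.append(str)
--         str = ""
--     return sous_chaine
-- ===== SOURCE B (Python) =====
-- def IC11(a):
--     buckets = [""] * 11
--     for i, ch in enumerate(a):
--         buckets[i % 11] += ch
--     return buckets
-- ===== Notes on version B (the rewrite author's own statement) =====
-- stated objective: alternative
-- what changed: Replaced the 11 strided gather passes over the string by a single scatter pass that appends each character to bucket i % 11 of a pre-filled list of 11 empty strings.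
import Mathlib
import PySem

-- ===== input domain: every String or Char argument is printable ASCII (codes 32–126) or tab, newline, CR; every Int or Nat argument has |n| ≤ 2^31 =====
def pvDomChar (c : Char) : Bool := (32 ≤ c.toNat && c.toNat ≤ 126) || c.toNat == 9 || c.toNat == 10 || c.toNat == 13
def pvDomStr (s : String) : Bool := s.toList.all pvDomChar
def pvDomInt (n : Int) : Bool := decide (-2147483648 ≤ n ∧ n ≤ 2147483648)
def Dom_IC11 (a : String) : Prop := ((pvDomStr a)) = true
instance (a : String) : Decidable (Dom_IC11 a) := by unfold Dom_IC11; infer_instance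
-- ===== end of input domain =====

-- B replaces A's 11 strided gather passes over the string by one scatter pass that
-- appends each character to bucket i % 11 of a list of 11 empty strings (objective: alternative, single pass).

-- ===== PORT A =====
-- A: for j in range(0,11): gather a[j], a[j+11], … into a string, append it to the result list.
-- every index i drawn from range(j, len(a), 11) is in range, so pyGetD's default is never read.
def IC11 (a : String) : List String :=
  (PySem.List.pyRange 0 11 1).foldl
    (fun sous_chaine j =>
      let str := (PySem.List.pyRange j (PySem.Str.len a) 11).foldl
        (fun str i => str ++ [PySem.List.pyGetD a.toList i ' ']) []
      sous_chaine ++ [String.ofList str]) []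

-- ===== PORT B =====
-- B: one pass over enumerate(a); buckets[i % 11] += ch.  Indices i % 11 are always in range 0..10.
def IC11_alt (a : String) : List String :=
  ((PySem.List.enumerate a.toList 0).foldl
    (fun buckets p =>
      let k := PySem.Int.mod p.1 11
      PySem.List.pySetD buckets k (PySem.List.pyGetD buckets k [] ++ [p.2]))
    (List.replicate 11 ([] : List Char))).map String.ofList

-- ===== PRECONDITION & SPEC =====
def Spec_IC11 (a : String) (out : List String) : Prop := out = IC11_alt a
instance (a : String) (out : List String) : Decidable (Spec_IC11 a out) := by unfold Spec_IC11; infer_instance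

-- ===== CLAIM (what is proved, stated in full; the proofs are below) =====
def Claim_equal_IC11 : Prop := ∀ (a : String), Dom_IC11 a → Spec_IC11 a (IC11 a)

-- ===== LEMMAS AND PROOFS =====

-- A's bucket j, in map form (the inner foldl of IC11 after foldl_append_singleton_eq_map).
def gA (l : List Char) (j : Int) : List Char :=
  (PySem.List.pyRange j (l.length : Int) 11).map (fun i => PySem.List.pyGetD l i ' ')

-- B's bucket state after the scatter pass (the foldl of IC11_alt).
def bB (l : List Char) : List (List Char) :=
  (PySem.List.enumerate l 0).foldl
    (fun buckets p =>
      let k := PySem.Int.mod p.1 11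
      PySem.List.pySetD buckets k (PySem.List.pyGetD buckets k [] ++ [p.2]))
    (List.replicate 11 ([] : List Char))

theorem enumerate_append_singleton {α : Type} (xs : List α) (y : α) (s : Int) :
    PySem.List.enumerate (xs ++ [y]) s
      = PySem.List.enumerate xs s ++ [((s + xs.length : Int), y)] := by
  induction xs generalizing s with
  | nil => simp [PySem.List.enumerate]
  | cons x xs ih =>
      simp [PySem.List.enumerate_cons, ih]
      ring_nf

theorem pyRange_eleven_succ_right (n j : Int) (hj : 0 ≤ j) (hj2 : j < 11) (hn : 0 ≤ n) :
    PySem.List.pyRange j (n + 1) 11 =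
      PySem.List.pyRange j n 11 ++ (if (n - j) % 11 = 0 then [n] else []) := by
  rw [PySem.List.pyRange_of_pos _ _ (by norm_num : (0:Int) < 11),
      PySem.List.pyRange_of_pos _ _ (by norm_num : (0:Int) < 11)]
  by_cases h : (n - j) % 11 = 0
  · simp only [h, if_true]
    have h1 : (if j < n + 1 then ((n + 1 - j + 11 - 1) / 11).toNat else 0)
        = (if j < n then ((n - j + 11 - 1) / 11).toNat else 0) + 1 := by
      split_ifs <;> omega
    rw [h1, List.range_succ, List.map_append]
    congr 1
    simp only [List.map_cons, List.map_nil]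
    congr 1
    split_ifs with h2
    · omega
    · omega
  · simp only [h, if_false, List.append_nil]
    have h1 : (if j < n + 1 then ((n + 1 - j + 11 - 1) / 11).toNat else 0)
        = (if j < n then ((n - j + 11 - 1) / 11).toNat else 0) := by
      split_ifs <;> omega
    rw [h1]

theorem gA_append (l : List Char) (c : Char) (j : Int) (hj : 0 ≤ j) (hj2 : j < 11) :
    gA (l ++ [c]) j
      = gA l j ++ (if ((l.length : Int) - j) % 11 = 0 then [c] else []) := by
  unfold gA
  have hlen : ((l ++ [c]).length : Int) = (l.length : Int) + 1 := by simp
  rw [hlen, pyRange_eleven_succ_right _ _ hj hj2 (by positivity), List.map_append]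
  congr 1
  · apply List.map_congr_left
    intro i hi
    have hmem := (PySem.List.mem_pyRange_iff_of_pos (by norm_num : (0:Int) < 11) i).mp hi
    have h0 : 0 ≤ i := le_trans hj hmem.1
    have h1 : i < (l.length : Int) := hmem.2.1
    rw [PySem.List.pyGetD_eq_getElem _ _ h0 (by simp; omega),
        PySem.List.pyGetD_eq_getElem _ _ h0 (by omega)]
    exact List.getElem_append_left (by omega)
  · split_ifs
    · simp only [List.map_cons, List.map_nil]
      congr 1
      rw [PySem.List.pyGetD_eq_getElem _ _ (by positivity) (by simp)]
      simp
    · simp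

theorem bB_append (l : List Char) (c : Char) :
    bB (l ++ [c])
      = PySem.List.pySetD (bB l) (PySem.Int.mod l.length 11)
          (PySem.List.pyGetD (bB l) (PySem.Int.mod l.length 11) [] ++ [c]) := by
  unfold bB
  rw [enumerate_append_singleton, List.foldl_append]
  simp

theorem bB_eq_map_gA (l : List Char) :
    bB l = (PySem.List.pyRange 0 11 1).map (fun j => gA l j) := by
  induction l using List.reverseRecOn with
  | nil => decide
  | append_singleton l c ih =>
      rw [bB_append, ih]
      have hmod : PySem.Int.mod (l.length : Int) 11 = ((l.length % 11 : Nat) : Int) :=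
        PySem.Int.mod_natCast l.length 11
      rw [hmod, PySem.List.pySetD_natCast, PySem.List.pyGetD_natCast]
      have hgetD : ((PySem.List.pyRange 0 11 1).map (fun j => gA l j)).getD (l.length % 11) []
          = gA l ((l.length % 11 : Nat) : Int) := by
        rw [List.getD_eq_getElem _ _ (by simp [PySem.List.length_pyRange_one]; omega)]
        rw [List.getElem_map, PySem.List.getElem_pyRange_one]
        norm_num
      rw [hgetD]
      apply List.ext_getElem
      · simp [PySem.List.length_pyRange_one]
      · intro k hk1 hk2
        have hk11 : k < 11 := by
          simpa [PySem.List.length_pyRange_one] using hk1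
        rw [List.getElem_set, List.getElem_map, List.getElem_map,
            PySem.List.getElem_pyRange_one]
        simp only [zero_add]
        rw [gA_append _ _ _ (by positivity) (by exact_mod_cast hk11)]
        by_cases hcase : l.length % 11 = k
        · simp only [hcase, if_true]
          have h2 : (((l.length : Int)) - (k : Int)) % 11 = 0 := by omega
          simp [h2]
        · simp only [hcase, if_false]
          have h2 : ¬ ((((l.length : Int)) - (k : Int)) % 11 = 0) := by omega
          simp [h2]

-- ===== VERDICT (by name: the statement is the Claim_ definition above) =====
theorem IC11_spec : Claim_equal_IC11 := by
  intro a _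
  unfold Spec_IC11 IC11 IC11_alt
  simp only [PySem.List.foldl_append_singleton_eq_map, List.nil_append, PySem.Str.len_eq]
  rw [show (PySem.List.enumerate a.toList 0).foldl
        (fun buckets p =>
          let k := PySem.Int.mod p.1 11
          PySem.List.pySetD buckets k (PySem.List.pyGetD buckets k [] ++ [p.2]))
        (List.replicate 11 ([] : List Char)) = bB a.toList from rfl,
      bB_eq_map_gA, List.map_map]
  rfl
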